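-- pv_equiv track=rewrite | github.com/IPMI-ICNS-UKE/4d-cbct-mc | vroc/helper.py | get_mode_from_alternation_scheme
-- ===== SOURCE A (Python) =====
-- from typing import TYPE_CHECKING, Any, Hashable, Sequence, Tuple
--
-- def get_mode_from_alternation_scheme(
--     alternation_scheme: dict[Hashable, int], iteration: int
-- ) -> Hashable:
--     total_iterations = sum(alternation_scheme.values())
--     residual = iteration % total_iterations
--     for mode, mode_iterations in alternation_scheme.items():
--         residual -= mode_iterations
--         if residual < 0:
--             return mode
-- ===== SOURCE B (Python) =====
-- def get_mode_from_alternation_scheme(alternation_scheme, iteration):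
--     residual = iteration % sum(alternation_scheme.values())
--     cumulative = []
--     running = 0
--     for mode_iterations in alternation_scheme.values():
--         running += mode_iterations
--         cumulative.append(running)
--     return next(mode for mode, c in zip(alternation_scheme, cumulative) if residual < c)
-- ===== Notes on version B (the rewrite author's own statement) =====
-- stated objective: alternative
-- what changed: B precomputes a cumulative prefix-sum table over the weights and then selects the first key whose cumulative weight exceeds iteration % total, instead of A's streaming loop that destructively subtracts each weight from the residual until it goes negative.
-- outside the precondition, e.g. on get_mode_from_alternation_scheme({'a': -1}, 0): A returns None, B raises StopIteration
import Mathlib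
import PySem

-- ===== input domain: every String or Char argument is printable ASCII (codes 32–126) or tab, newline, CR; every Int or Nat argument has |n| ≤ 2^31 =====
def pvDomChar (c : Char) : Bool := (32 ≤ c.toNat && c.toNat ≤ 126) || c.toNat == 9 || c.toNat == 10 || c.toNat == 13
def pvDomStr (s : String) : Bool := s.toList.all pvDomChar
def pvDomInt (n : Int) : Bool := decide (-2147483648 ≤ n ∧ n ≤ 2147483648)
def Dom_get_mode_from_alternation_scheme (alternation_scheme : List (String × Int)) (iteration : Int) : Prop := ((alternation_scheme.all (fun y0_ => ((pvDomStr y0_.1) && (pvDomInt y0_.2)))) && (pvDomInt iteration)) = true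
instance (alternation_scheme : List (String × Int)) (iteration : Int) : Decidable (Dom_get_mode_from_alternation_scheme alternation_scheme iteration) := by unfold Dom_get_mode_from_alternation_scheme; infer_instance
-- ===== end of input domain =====

-- B replaces A's destructive subtract-until-negative scan by a cumulative prefix-sum table
-- plus a first-match search over it (alternative decomposition, same asymptotic cost).


-- ===== PORT A =====
-- A's loop: subtract each weight from the residual, return the key once it goes negative.
-- Python returns None when the loop falls through; that input is outside Pre_ ("" here).
def pvScanA : List (String × Int) → Int → String
  | [], _ => ""
  | (mode, w) :: rest, residual =>
    if residual - w < 0 then mode else pvScanA rest (residual - w)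

def get_mode_from_alternation_scheme (alternation_scheme : List (String × Int)) (iteration : Int) : String :=
  let total_iterations := (alternation_scheme.map Prod.snd).sum
  let residual := PySem.Int.mod iteration total_iterations
  pvScanA alternation_scheme residual

-- ===== PORT B =====
-- B's table-building loop: running prefix sums of the weights.
def pvAccum (running : Int) : List Int → List Int
  | [] => []
  | w :: ws => (running + w) :: pvAccum (running + w) ws

def get_mode_from_alternation_scheme_alt (alternation_scheme : List (String × Int)) (iteration : Int) : String :=
  let residual := PySem.Int.mod iteration (alternation_scheme.map Prod.snd).sum
  let cumulative := pvAccum 0 (alternation_scheme.map Prod.snd)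
  -- next(mode for mode, c in zip(keys, cumulative) if residual < c); StopIteration is outside Pre_ ("" here)
  match ((alternation_scheme.map Prod.fst).zip cumulative).find? (fun mc => decide (residual < mc.2)) with
  | some mc => mc.1
  | none => ""

-- ===== PRECONDITION & SPEC =====
-- Pre_ excludes exactly the inputs where Python A does not return a string: total = 0
-- (ZeroDivisionError) and the negative-total schemes where no cumulative prefix of the
-- weights exceeds iteration % total, on which A falls through and returns None.
def Pre_get_mode_from_alternation_scheme (alternation_scheme : List (String × Int)) (iteration : Int) : Prop :=
  (alternation_scheme.map Prod.snd).sum ≠ 0 ∧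
  ∃ i < alternation_scheme.length,
    PySem.Int.mod iteration (alternation_scheme.map Prod.snd).sum
      < ((alternation_scheme.map Prod.snd).take (i + 1)).sum
instance (alternation_scheme : List (String × Int)) (iteration : Int) : Decidable (Pre_get_mode_from_alternation_scheme alternation_scheme iteration) := by unfold Pre_get_mode_from_alternation_scheme; infer_instance

def pvWitness_get_mode_from_alternation_scheme : (List (String × Int)) × Int := ([("a", 1), ("b", 2)], 5)

def Spec_get_mode_from_alternation_scheme (alternation_scheme : List (String × Int)) (iteration : Int) (out : String) : Prop := out = get_mode_from_alternation_scheme_alt alternation_scheme iteration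
instance (alternation_scheme : List (String × Int)) (iteration : Int) (out : String) : Decidable (Spec_get_mode_from_alternation_scheme alternation_scheme iteration out) := by unfold Spec_get_mode_from_alternation_scheme; infer_instance

-- ===== CLAIM (what is proved, stated in full; the proofs are below) =====
def Claim_equal_get_mode_from_alternation_scheme : Prop := ∀ (alternation_scheme : List (String × Int)) (iteration : Int), Dom_get_mode_from_alternation_scheme alternation_scheme iteration → Pre_get_mode_from_alternation_scheme alternation_scheme iteration → Spec_get_mode_from_alternation_scheme alternation_scheme iteration (get_mode_from_alternation_scheme alternation_scheme iteration)

-- ===== LEMMAS AND PROOFS =====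
-- A's streaming scan started at residual r - acc equals B's first-match search over the
-- prefix-sum table started at running value acc (for every r and acc; the claim uses acc = 0).
theorem pvScan_eq_find (s : List (String × Int)) : ∀ (r acc : Int),
    pvScanA s (r - acc) =
      (match ((s.map Prod.fst).zip (pvAccum acc (s.map Prod.snd))).find?
          (fun mc => decide (r < mc.2)) with
        | some mc => mc.1
        | none => "") := by
  induction s with
  | nil => intro r acc; simp [pvScanA, pvAccum]
  | cons hd tl ih =>
    intro r acc
    obtain ⟨m, w⟩ := hd
    by_cases h : r < acc + w
    · simp [pvScanA, pvAccum, show r - acc - w < 0 by omega, decide_eq_true h]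
    · have h1 : ¬ (r - acc - w < 0) := by omega
      simp only [pvScanA, pvAccum, List.map, List.zip_cons_cons, List.find?, if_neg h1,
        decide_eq_false h]
      have := ih r (acc + w)
      have h2 : r - acc - w = r - (acc + w) := by omega
      rw [h2, this]

-- ===== VERDICT (by name: the statement is the Claim_ definition above) =====
theorem get_mode_from_alternation_scheme_spec : Claim_equal_get_mode_from_alternation_scheme := by
  intro s it _ _
  unfold Spec_get_mode_from_alternation_scheme
  unfold get_mode_from_alternation_scheme get_mode_from_alternation_scheme_alt
  have := pvScan_eq_find s (PySem.Int.mod it (s.map Prod.snd).sum) 0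
  simpa using this
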